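-- pv_equiv track=rewrite | github.com/ihasidul/Programming-for-Information-Systems | python-exercises/main.py | get_multiples
-- ===== SOURCE A (Python) =====
-- def get_multiples(multiples: list, limit: int) -> list:
--     multiples_lst = []
--     for number in range(1,limit):
--         if any(number % m == 0 for m in multiples):
--             multiples_lst.append(number)
--         else:
--             pass
--     return multiples_lst
-- ===== SOURCE B (Python) =====
-- def get_multiples(multiples: list, limit: int) -> list:
--     marked = set()
--     for m in multiples:
--         if m != 0:
--             step = abs(m)
--             marked.update(range(step, limit, step))
--     return sorted(marked)
-- ===== Notes on version B (the rewrite author's own statement) =====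
-- stated objective: faster
-- what changed: Instead of testing every number in range(1, limit) against every divisor, B marks each nonzero divisor's multiples below the limit into a set (a sieve) and returns the sorted set.
import Mathlib
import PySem

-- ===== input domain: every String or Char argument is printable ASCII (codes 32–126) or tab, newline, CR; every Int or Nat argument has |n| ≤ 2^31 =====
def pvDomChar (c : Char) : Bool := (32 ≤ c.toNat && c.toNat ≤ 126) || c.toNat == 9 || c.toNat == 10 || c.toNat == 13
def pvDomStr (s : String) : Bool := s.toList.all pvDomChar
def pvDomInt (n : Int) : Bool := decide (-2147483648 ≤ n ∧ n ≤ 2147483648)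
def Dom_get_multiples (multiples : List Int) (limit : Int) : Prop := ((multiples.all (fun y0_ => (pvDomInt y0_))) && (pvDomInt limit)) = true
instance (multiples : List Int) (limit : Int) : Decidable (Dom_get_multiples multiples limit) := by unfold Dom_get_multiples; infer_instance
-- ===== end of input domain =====

-- B replaces A's per-number scan of all divisors by a sieve: mark each nonzero
-- divisor's multiples below the limit into a set, then sort (objective: faster).

-- ===== PORT A =====
def get_multiples (multiples : List Int) (limit : Int) : List Int :=
  (PySem.List.pyRange 1 limit 1).foldl
    (fun acc number =>
      if multiples.any (fun m => PySem.Int.mod number m == 0) then acc ++ [number] else acc)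
    []

-- ===== PORT B =====
def get_multiples_alt (multiples : List Int) (limit : Int) : List Int :=
  let marked : PySem.Set Int := multiples.foldl
    (fun s m =>
      if m ≠ 0 then PySem.Set.update s (PySem.List.pyRange (m.natAbs : Int) limit (m.natAbs : Int))
      else s)
    PySem.Set.empty
  PySem.List.sorted marked (fun x => x)

-- ===== PRECONDITION & SPEC =====
-- Pre_ excludes exactly the inputs on which Python A raises ZeroDivisionError: a 0 divisor
-- reached (limit ≥ 2, 0 ∈ multiples, and no ±1 earlier in the list to short-circuit `any`).
def Pre_get_multiples (multiples : List Int) (limit : Int) : Prop :=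
  limit ≤ 1 ∨ (0 : Int) ∉ multiples ∨
    (1 : Int) ∈ multiples.takeWhile (fun m => m != 0) ∨
    (-1 : Int) ∈ multiples.takeWhile (fun m => m != 0)
instance (multiples : List Int) (limit : Int) : Decidable (Pre_get_multiples multiples limit) := by
  unfold Pre_get_multiples; infer_instance

def pvWitness_get_multiples : List Int × Int := ([3, 5], 10)

def Spec_get_multiples (multiples : List Int) (limit : Int) (out : List Int) : Prop := out = get_multiples_alt multiples limit
instance (multiples : List Int) (limit : Int) (out : List Int) : Decidable (Spec_get_multiples multiples limit out) := by unfold Spec_get_multiples; infer_instance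

-- ===== CLAIM (what is proved, stated in full; the proofs are below) =====
def Claim_equal_get_multiples : Prop := ∀ (multiples : List Int) (limit : Int), Dom_get_multiples multiples limit → Pre_get_multiples multiples limit → Spec_get_multiples multiples limit (get_multiples multiples limit)


-- ===== LEMMAS AND PROOFS =====

-- membership in B's sieve set
theorem mem_marked (multiples : List Int) (limit : Int) (s : PySem.Set Int) (n : Int) :
    n ∈ multiples.foldl
      (fun s m =>
        if m ≠ 0 then PySem.Set.update s (PySem.List.pyRange (m.natAbs : Int) limit (m.natAbs : Int))
        else s) s ↔
    n ∈ s ∨ ∃ m ∈ multiples, m ≠ 0 ∧ n ∈ PySem.List.pyRange (m.natAbs : Int) limit (m.natAbs : Int) := by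
  induction multiples generalizing s with
  | nil => simp
  | cons m ms ih =>
    simp only [List.foldl_cons]
    by_cases hm : m = 0
    · rw [if_neg (by simp [hm]), ih]
      constructor
      · rintro (h | ⟨m', h1, h2, h3⟩)
        · exact Or.inl h
        · exact Or.inr ⟨m', List.mem_cons_of_mem _ h1, h2, h3⟩
      · rintro (h | ⟨m', hm', h2, h3⟩)
        · exact Or.inl h
        · rcases List.mem_cons.mp hm' with rfl | h1
          · exact absurd hm h2
          · exact Or.inr ⟨m', h1, h2, h3⟩
    · rw [if_pos hm, ih]
      simp only [PySem.Set.mem_update, List.mem_cons]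
      constructor
      · rintro (⟨h | h⟩ | ⟨m', hm', h0, h⟩)
        · exact Or.inl h
        · exact Or.inr ⟨m, Or.inl rfl, hm, h⟩
        · exact Or.inr ⟨m', Or.inr hm', h0, h⟩
      · rintro (h | ⟨m', (rfl | hm'), h0, h⟩)
        · exact Or.inl (Or.inl h)
        · exact Or.inl (Or.inr h)
        · exact Or.inr ⟨m', hm', h0, h⟩

theorem nodup_marked (multiples : List Int) (limit : Int) (s : PySem.Set Int) (hs : s.Nodup) :
    (multiples.foldl
      (fun s m =>
        if m ≠ 0 then PySem.Set.update s (PySem.List.pyRange (m.natAbs : Int) limit (m.natAbs : Int))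
        else s) s).Nodup := by
  induction multiples generalizing s with
  | nil => exact hs
  | cons m ms ih =>
    simp only [List.foldl_cons]
    by_cases hm : m = 0
    · rw [if_neg (by simp [hm])]
      exact ih s hs
    · rw [if_pos hm]
      exact ih _ (PySem.Set.nodup_update _ _ hs)

-- the characterisation both sides share: n is kept iff some nonzero divisor divides it
theorem mem_range_divisor (limit n m : Int) (hn1 : 1 ≤ n) :
    (m ≠ 0 ∧ n ∈ PySem.List.pyRange (m.natAbs : Int) limit (m.natAbs : Int)) ↔
    (n < limit ∧ PySem.Int.mod n m = 0) := by
  constructor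
  · rintro ⟨hm, hr⟩
    have hpos : (0 : Int) < (m.natAbs : Int) := by
      have := Int.natAbs_pos.mpr hm; exact_mod_cast this
    rw [PySem.List.mem_pyRange_iff_of_pos hpos] at hr
    obtain ⟨hle, hlt, hdvd⟩ := hr
    refine ⟨hlt, ?_⟩
    rw [PySem.Int.mod_eq_zero_iff_dvd]
    have : ((m.natAbs : Int)) ∣ n := by
      have h2 := dvd_add hdvd (dvd_refl ((m.natAbs : Int)))
      simpa using h2
    exact Int.natAbs_dvd.mp this
  · rintro ⟨hlt, hmod⟩
    rw [PySem.Int.mod_eq_zero_iff_dvd] at hmod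
    have hm : m ≠ 0 := by
      rintro rfl; rw [zero_dvd_iff] at hmod; omega
    have hdvd : ((m.natAbs : Int)) ∣ n := Int.natAbs_dvd.mpr hmod
    have hpos : (0 : Int) < (m.natAbs : Int) := by
      have := Int.natAbs_pos.mpr hm; exact_mod_cast this
    refine ⟨hm, (PySem.List.mem_pyRange_iff_of_pos hpos n).mpr ⟨?_, hlt, ?_⟩⟩
    · exact Int.le_of_dvd (by omega) hdvd
    · exact dvd_sub hdvd (dvd_refl _)

theorem ports_agree (multiples : List Int) (limit : Int) :
    get_multiples multiples limit = get_multiples_alt multiples limit := by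
  unfold get_multiples get_multiples_alt
  rw [PySem.List.foldl_append_if_eq_filter, List.nil_append]
  refine (PySem.List.sorted_eq_of_perm_of_pairwise_lt _ _ _ ?_ ?_).symm
  · rw [List.perm_ext_iff_of_nodup
      (List.Nodup.filter _ (PySem.List.nodup_pyRange_one 1 limit))
      (nodup_marked multiples limit PySem.Set.empty List.nodup_nil)]
    intro n
    rw [List.mem_filter, mem_marked, PySem.List.mem_pyRange_one]
    simp only [PySem.Set.empty, List.not_mem_nil, false_or, List.any_eq_true, beq_iff_eq]
    constructor
    · rintro ⟨⟨h1, h2⟩, m, hm, hmod⟩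
      exact ⟨m, hm, ((mem_range_divisor limit n m h1).mpr ⟨h2, hmod⟩)⟩
    · rintro ⟨m, hm, hne, hr⟩
      have hpos : (0 : Int) < (m.natAbs : Int) := by
        have := Int.natAbs_pos.mpr hne; exact_mod_cast this
      have h1 : 1 ≤ n := by
        have := (PySem.List.mem_pyRange_iff_of_pos hpos n).mp hr
        omega
      have := (mem_range_divisor limit n m h1).mp ⟨hne, hr⟩
      exact ⟨⟨h1, this.1⟩, m, hm, this.2⟩
  · exact List.Pairwise.filter _ (PySem.List.pairwise_lt_pyRange_one 1 limit)

-- ===== VERDICT (by name: the statement is the Claim_ definition above) =====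
theorem get_multiples_spec : Claim_equal_get_multiples := by
  intro multiples limit _ _
  unfold Spec_get_multiples
  exact ports_agree multiples limit
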